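-- pv_equiv track=rewrite | github.com/vishwakarmad1999/placement100 | P100/Recursion/cows.py | f
-- ===== SOURCE A (Python) =====
-- def f(n):
--     if n <= 3:
--         return n - 1
--
--     total = 0
--     for i in range(1, n):
--         if i == n - 2:
--             continue
--         total += i
--
--     return total + 1
-- ===== SOURCE B (Python) =====
-- def f(n):
--     if n <= 3:
--         return n - 1
--     return n * (n - 1) // 2 - (n - 2) + 1
-- ===== Notes on version B (the rewrite author's own statement) =====
-- stated objective: faster
-- what changed: Replaces the linear summation loop with a closed-form Gauss-sum arithmetic expression.
import Mathlib
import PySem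

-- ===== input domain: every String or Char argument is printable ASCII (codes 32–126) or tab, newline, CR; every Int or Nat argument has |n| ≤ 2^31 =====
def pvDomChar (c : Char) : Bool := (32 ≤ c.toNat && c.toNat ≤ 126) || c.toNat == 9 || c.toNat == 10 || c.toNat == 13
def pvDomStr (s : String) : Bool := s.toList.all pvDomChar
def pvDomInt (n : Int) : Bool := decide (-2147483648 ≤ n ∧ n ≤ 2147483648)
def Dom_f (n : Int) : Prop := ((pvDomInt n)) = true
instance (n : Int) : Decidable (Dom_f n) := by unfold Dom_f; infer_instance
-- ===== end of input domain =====

-- B replaces A's O(n) summation loop with the closed-form Gauss formula (O(1)).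

-- ===== PORT A =====
def f (n : Int) : Int :=
  if n ≤ 3 then n - 1
  else
    let total := (PySem.List.pyRange 1 n 1).foldl
      (fun total i => if i == n - 2 then total else total + i) 0
    total + 1

-- ===== PORT B =====
def f_alt (n : Int) : Int :=
  if n ≤ 3 then n - 1
  else PySem.Int.floordiv (n * (n - 1)) 2 - (n - 2) + 1

-- ===== PRECONDITION & SPEC =====
def Spec_f (n : Int) (out : Int) : Prop := out = f_alt n
instance (n : Int) (out : Int) : Decidable (Spec_f n out) := by unfold Spec_f; infer_instance

-- ===== CLAIM (what is proved, stated in full; the proofs are below) =====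
def Claim_equal_f : Prop := ∀ (n : Int), Dom_f n → Spec_f n (f n)

-- ===== LEMMAS AND PROOFS =====

-- Loop invariant: twice the running total after folding range(a, n) starting from acc.
theorem f_loop_eq (n : Int) (hn : 3 < n) :
    ∀ (k : Nat) (a acc : Int), 1 ≤ a → a ≤ n → (n - a).toNat = k →
      2 * ((PySem.List.pyRange a n 1).foldl
            (fun total i => if i == n - 2 then total else total + i) acc)
        = 2 * acc + (n * (n - 1) - a * (a - 1))
            - (if a ≤ n - 2 then 2 * (n - 2) else 0) := by
  intro k
  induction k with
  | zero =>
    intro a acc h1 h2 h3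
    have ha : a = n := by omega
    rw [PySem.List.pyRange_one_eq_nil (by omega : n ≤ a)]
    simp only [List.foldl_nil]
    rw [if_neg (by omega : ¬ (a ≤ n - 2)), ha]
    ring
  | succ k ih =>
    intro a acc h1 h2 h3
    have hab : a < n := by omega
    rw [PySem.List.pyRange_one_cons hab]
    simp only [List.foldl_cons]
    by_cases hc : a = n - 2
    · have hbeq : (a == n - 2) = true := by simp [hc]
      rw [hbeq]
      simp only [if_true]
      rw [ih (a + 1) acc (by omega) (by omega) (by omega)]
      have h4 : ¬ (a + 1 ≤ n - 2) := by omega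
      have h5 : a ≤ n - 2 := by omega
      rw [if_neg h4, if_pos h5]
      nlinarith [hc]
    · have hbeq : (a == n - 2) = false := by simp [hc]
      rw [hbeq]
      simp only [Bool.false_eq_true, if_false]
      rw [ih (a + 1) (acc + a) (by omega) (by omega) (by omega)]
      by_cases h5 : a + 1 ≤ n - 2
      · rw [if_pos h5, if_pos (by omega : a ≤ n - 2)]; ring
      · have h6 : ¬ (a ≤ n - 2) := by omega
        rw [if_neg h5, if_neg h6]; ring

-- ===== VERDICT (by name: the statement is the Claim_ definition above) =====
theorem f_spec : Claim_equal_f := by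
  intro n _
  unfold Spec_f f f_alt
  by_cases hn : n ≤ 3
  · simp [hn]
  · have hn' : 3 < n := by omega
    rw [if_neg hn, if_neg hn]
    show ((PySem.List.pyRange 1 n 1).foldl
      (fun total i => if i == n - 2 then total else total + i) 0) + 1
      = PySem.Int.floordiv (n * (n - 1)) 2 - (n - 2) + 1
    have h := f_loop_eq n hn' (n - 1).toNat 1 0 (by omega) (by omega) (by omega)
    rw [if_pos (by omega : (1:Int) ≤ n - 2)] at h
    rw [PySem.Int.floordiv_eq_ediv_of_pos (by norm_num)]
    omega
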